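-- pv_equiv track=rewrite | github.com/maxostlund/Gamla-projekt-runt-2020 | Programmering/Python/Kattis/glitchbot.py | GetTargetLocation
-- ===== SOURCE A (Python) =====
-- def GetTargetLocation(list):
--     x = 0
--     y = 0
--     rotation = 90 # begins looking up
--     for i in range(0, len(list)):
--         if(list[i] == "Forward"):
--             if(rotation == 0):
--                 x += 1
--             elif(rotation == 90):
--                 y += 1
--             elif(rotation == 180):
--                 x -= 1
--             elif(rotation == 270):
--                 y -=1
--         elif(list[i] == "Left"):
--             rotation += 90
--             if (rotation == 360):
--                 rotation = 0
--         elif(list[i] == "Right"):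
--             rotation -= 90
--             if(rotation == -90):
--                 rotation = 270
--     res = [x, y]
--     return res
-- ===== SOURCE B (Python) =====
-- def GetTargetLocation(list):
--     # Stage 1: heading index before each command (0=E, 1=N, 2=W, 3=S),
--     # from the running net-turn count (start facing north = 1).
--     headings = []
--     t = 1
--     for cmd in list:
--         headings.append(t)
--         t += (cmd == "Left") - (cmd == "Right")
--     # Stage 2: count Forward moves per heading class (mod 4).
--     cnt = {}
--     for cmd, h in zip(list, headings):
--         if cmd == "Forward":
--             k = h % 4
--             cnt[k] = cnt.get(k, 0) + 1
--     # Closed form from the counts.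
--     return [cnt.get(0, 0) - cnt.get(2, 0), cnt.get(1, 0) - cnt.get(3, 0)]
-- ===== Notes on version B (the rewrite author's own statement) =====
-- stated objective: alternative
-- what changed: Replaces A's stateful walk simulation (position + rotation angle updated per step) with a staged counting approach: first a prefix-scan of net turns yields each command's heading class, then Forward moves are tallied per heading class mod 4 in a counter dict, and the coordinates are read off as closed-form differences of counts.
import Mathlib
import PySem

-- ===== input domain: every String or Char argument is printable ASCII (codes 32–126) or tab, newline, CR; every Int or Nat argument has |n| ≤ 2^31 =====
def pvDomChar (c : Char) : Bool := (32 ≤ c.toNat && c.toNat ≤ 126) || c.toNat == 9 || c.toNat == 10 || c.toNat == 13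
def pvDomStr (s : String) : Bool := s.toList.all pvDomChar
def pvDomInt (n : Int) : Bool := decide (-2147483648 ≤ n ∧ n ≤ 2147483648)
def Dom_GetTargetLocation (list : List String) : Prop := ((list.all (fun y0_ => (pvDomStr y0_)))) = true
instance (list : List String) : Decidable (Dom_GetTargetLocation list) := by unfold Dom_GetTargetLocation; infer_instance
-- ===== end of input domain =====

-- B replaces A's stateful walk simulation with staged counting: a prefix-scan of net
-- turns gives each command's heading class, Forward moves are tallied per class mod 4,
-- and the coordinates are differences of counts (alternative decomposition; same cost).

-- ===== PORT A =====
-- state: (x, y, rotation)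
def pvStepA (s : Int × Int × Int) (c : String) : Int × Int × Int :=
  let (x, y, rotation) := s
  if c = "Forward" then
    if rotation = 0 then (x + 1, y, rotation)
    else if rotation = 90 then (x, y + 1, rotation)
    else if rotation = 180 then (x - 1, y, rotation)
    else if rotation = 270 then (x, y - 1, rotation)
    else (x, y, rotation)
  else if c = "Left" then
    let rotation := rotation + 90
    if rotation = 360 then (x, y, 0) else (x, y, rotation)
  else if c = "Right" then
    let rotation := rotation - 90
    if rotation = -90 then (x, y, 270) else (x, y, rotation)
  else (x, y, rotation)

def GetTargetLocation (list : List String) : List Int :=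
  let s := list.foldl pvStepA (0, 0, 90)
  [s.1, s.2.1]

-- ===== PORT B =====
-- t += (cmd == "Left") - (cmd == "Right")
def pvTurn (cmd : String) : Int :=
  (if cmd = "Left" then 1 else 0) - (if cmd = "Right" then 1 else 0)

-- Stage 1: headings.append(t); t += turn
def pvHeadings (list : List String) : List Int :=
  (list.foldl (fun (acc : List Int × Int) cmd => (acc.1 ++ [acc.2], acc.2 + pvTurn cmd)) ([], 1)).1

-- Stage 2: cnt[k] = cnt.get(k, 0) + 1 for Forward commands, k = h % 4
def pvCounts (list : List String) : PySem.Dict Int Int :=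
  (list.zip (pvHeadings list)).foldl
    (fun cnt p =>
      if p.1 = "Forward" then
        cnt.insert (PySem.Int.mod p.2 4) (cnt.getD (PySem.Int.mod p.2 4) 0 + 1)
      else cnt)
    PySem.Dict.empty

def GetTargetLocation_alt (list : List String) : List Int :=
  let cnt := pvCounts list
  [cnt.getD 0 0 - cnt.getD 2 0, cnt.getD 1 0 - cnt.getD 3 0]

-- ===== PRECONDITION & SPEC =====
def Spec_GetTargetLocation (list : List String) (out : List Int) : Prop := out = GetTargetLocation_alt list
instance (list : List String) (out : List Int) : Decidable (Spec_GetTargetLocation list out) := by unfold Spec_GetTargetLocation; infer_instance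

-- ===== CLAIM (what is proved, stated in full; the proofs are below) =====
def Claim_equal_GetTargetLocation : Prop := ∀ (list : List String), Dom_GetTargetLocation list → Spec_GetTargetLocation list (GetTargetLocation list)

-- ===== LEMMAS AND PROOFS =====

-- the running net-turn value before each command (spec of B's stage 1)
def pvPrefixes : List String → Int → List Int
  | [], _ => []
  | c :: r, t => t :: pvPrefixes r (t + pvTurn c)

-- number of "Forward" commands whose heading class (net turn mod 4) is k
def pvCntF : List String → Int → Int → Int
  | [], _, _ => 0
  | c :: r, t, k => (if c = "Forward" ∧ t % 4 = k then 1 else 0) + pvCntF r (t + pvTurn c) k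

theorem pvCntF_congr (l : List String) (t t' k : Int) (h : t % 4 = t' % 4) :
    pvCntF l t k = pvCntF l t' k := by
  induction l generalizing t t' with
  | nil => rfl
  | cons c r ih =>
    simp only [pvCntF, h]
    rw [ih (t + pvTurn c) (t' + pvTurn c) (by omega)]

theorem pvHeadings_spec (l : List String) (acc : List Int) (t : Int) :
    (l.foldl (fun (acc : List Int × Int) cmd => (acc.1 ++ [acc.2], acc.2 + pvTurn cmd)) (acc, t)).1
      = acc ++ pvPrefixes l t := by
  induction l generalizing acc t with
  | nil => simp [pvPrefixes]
  | cons c r ih => simp [pvPrefixes, ih]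

theorem pvCounts_getD (l : List String) (t k : Int) (d : PySem.Dict Int Int) :
    ((l.zip (pvPrefixes l t)).foldl
      (fun cnt p =>
        if p.1 = "Forward" then
          cnt.insert (PySem.Int.mod p.2 4) (cnt.getD (PySem.Int.mod p.2 4) 0 + 1)
        else cnt) d).getD k 0
      = d.getD k 0 + pvCntF l t k := by
  induction l generalizing t d with
  | nil => simp [pvPrefixes, pvCntF]
  | cons c r ih =>
    simp only [pvPrefixes, List.zip_cons_cons, List.foldl_cons, pvCntF]
    rw [ih]
    have hm : PySem.Int.mod t 4 = t % 4 := PySem.Int.mod_eq_emod_of_pos (by norm_num)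
    by_cases hf : c = "Forward"
    · simp only [hf, hm]
      by_cases hk : t % 4 = k
      · simp [PySem.Dict.getD, PySem.Dict.get?_insert_self, hk]; ring
      · simp [pysem, hk]
        intro h; exact absurd h.symm hk
    · simp [hf]

theorem pvSne1 : (("Left" : String) = "Forward") = False := by decide
theorem pvSne2 : (("Right" : String) = "Forward") = False := by decide
theorem pvSne3 : (("Right" : String) = "Left") = False := by decide

theorem pvTurn_Forward : pvTurn "Forward" = 0 := by decide
theorem pvTurn_Left : pvTurn "Left" = 1 := by decide
theorem pvTurn_Right : pvTurn "Right" = -1 := by decide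

theorem pvFoldA_spec (l : List String) (x y h : Int)
    (hh : h = 0 ∨ h = 1 ∨ h = 2 ∨ h = 3) :
    (l.foldl pvStepA (x, y, 90 * h)).1 = x + pvCntF l h 0 - pvCntF l h 2 ∧
    (l.foldl pvStepA (x, y, 90 * h)).2.1 = y + pvCntF l h 1 - pvCntF l h 3 := by
  induction l generalizing x y h with
  | nil => simp [pvCntF]
  | cons c r ih =>
    simp only [List.foldl_cons]
    by_cases hf : c = "Forward"
    · subst hf
      rcases hh with rfl | rfl | rfl | rfl
      · norm_num [pvStepA, pvCntF, pvTurn_Forward, pvTurn_Left, pvTurn_Right, pvSne1, pvSne2, pvSne3]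
        obtain ⟨h1, h2⟩ := ih (x + 1) y 0 (by norm_num)
        norm_num at h1 h2; constructor <;> omega
      · norm_num [pvStepA, pvCntF, pvTurn_Forward, pvTurn_Left, pvTurn_Right, pvSne1, pvSne2, pvSne3]
        obtain ⟨h1, h2⟩ := ih x (y + 1) 1 (by norm_num)
        norm_num at h1 h2; constructor <;> omega
      · norm_num [pvStepA, pvCntF, pvTurn_Forward, pvTurn_Left, pvTurn_Right, pvSne1, pvSne2, pvSne3]
        obtain ⟨h1, h2⟩ := ih (x - 1) y 2 (by norm_num)
        norm_num at h1 h2; constructor <;> omega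
      · norm_num [pvStepA, pvCntF, pvTurn_Forward, pvTurn_Left, pvTurn_Right, pvSne1, pvSne2, pvSne3]
        obtain ⟨h1, h2⟩ := ih x (y - 1) 3 (by norm_num)
        norm_num at h1 h2; constructor <;> omega
    · by_cases hl : c = "Left"
      · subst hl
        rcases hh with rfl | rfl | rfl | rfl
        · norm_num [pvStepA, pvCntF, pvTurn_Forward, pvTurn_Left, pvTurn_Right, pvSne1, pvSne2, pvSne3]
          obtain ⟨h1, h2⟩ := ih x y 1 (by norm_num)
          norm_num at h1 h2; constructor <;> omega
        · norm_num [pvStepA, pvCntF, pvTurn_Forward, pvTurn_Left, pvTurn_Right, pvSne1, pvSne2, pvSne3]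
          obtain ⟨h1, h2⟩ := ih x y 2 (by norm_num)
          norm_num at h1 h2; constructor <;> omega
        · norm_num [pvStepA, pvCntF, pvTurn_Forward, pvTurn_Left, pvTurn_Right, pvSne1, pvSne2, pvSne3]
          obtain ⟨h1, h2⟩ := ih x y 3 (by norm_num)
          norm_num at h1 h2; constructor <;> omega
        · norm_num [pvStepA, pvCntF, pvTurn_Forward, pvTurn_Left, pvTurn_Right, pvSne1, pvSne2, pvSne3]
          have e0 := pvCntF_congr r 4 0 0 (by decide)
          have e1 := pvCntF_congr r 4 0 1 (by decide)
          have e2 := pvCntF_congr r 4 0 2 (by decide)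
          have e3 := pvCntF_congr r 4 0 3 (by decide)
          obtain ⟨h1, h2⟩ := ih x y 0 (by norm_num)
          norm_num at h1 h2; constructor <;> omega
      · by_cases hr : c = "Right"
        · subst hr
          rcases hh with rfl | rfl | rfl | rfl
          · norm_num [pvStepA, pvCntF, pvTurn_Forward, pvTurn_Left, pvTurn_Right, pvSne1, pvSne2, pvSne3]
            have e0 := pvCntF_congr r (-1) 3 0 (by decide)
            have e1 := pvCntF_congr r (-1) 3 1 (by decide)
            have e2 := pvCntF_congr r (-1) 3 2 (by decide)
            have e3 := pvCntF_congr r (-1) 3 3 (by decide)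
            obtain ⟨h1, h2⟩ := ih x y 3 (by norm_num)
            norm_num at h1 h2; constructor <;> omega
          · norm_num [pvStepA, pvCntF, pvTurn_Forward, pvTurn_Left, pvTurn_Right, pvSne1, pvSne2, pvSne3]
            obtain ⟨h1, h2⟩ := ih x y 0 (by norm_num)
            norm_num at h1 h2; constructor <;> omega
          · norm_num [pvStepA, pvCntF, pvTurn_Forward, pvTurn_Left, pvTurn_Right, pvSne1, pvSne2, pvSne3]
            obtain ⟨h1, h2⟩ := ih x y 1 (by norm_num)
            norm_num at h1 h2; constructor <;> omega
          · norm_num [pvStepA, pvCntF, pvTurn_Forward, pvTurn_Left, pvTurn_Right, pvSne1, pvSne2, pvSne3]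
            obtain ⟨h1, h2⟩ := ih x y 2 (by norm_num)
            norm_num at h1 h2; constructor <;> omega
        · rcases hh with rfl | rfl | rfl | rfl
          · norm_num [pvStepA, pvCntF, pvTurn, hf, hl, hr]
            obtain ⟨h1, h2⟩ := ih x y 0 (by norm_num)
            norm_num at h1 h2; constructor <;> omega
          · norm_num [pvStepA, pvCntF, pvTurn, hf, hl, hr]
            obtain ⟨h1, h2⟩ := ih x y 1 (by norm_num)
            norm_num at h1 h2; constructor <;> omega
          · norm_num [pvStepA, pvCntF, pvTurn, hf, hl, hr]
            obtain ⟨h1, h2⟩ := ih x y 2 (by norm_num)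
            norm_num at h1 h2; constructor <;> omega
          · norm_num [pvStepA, pvCntF, pvTurn, hf, hl, hr]
            obtain ⟨h1, h2⟩ := ih x y 3 (by norm_num)
            norm_num at h1 h2; constructor <;> omega

-- ===== VERDICT (by name: the statement is the Claim_ definition above) =====
theorem GetTargetLocation_spec : Claim_equal_GetTargetLocation := by
  intro l _
  unfold Spec_GetTargetLocation GetTargetLocation GetTargetLocation_alt pvCounts pvHeadings
  rw [pvHeadings_spec l [] 1]
  simp only [List.nil_append]
  obtain ⟨h1, h2⟩ := pvFoldA_spec l 0 0 1 (by norm_num)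
  rw [pvCounts_getD l 1 0, pvCounts_getD l 1 1, pvCounts_getD l 1 2, pvCounts_getD l 1 3]
  simp only [show (90 : Int) * 1 = 90 by norm_num] at h1 h2
  have he : ∀ k : Int, (PySem.Dict.empty : PySem.Dict Int Int).getD k 0 = 0 := fun _ => rfl
  simp only [he, h1, h2]
  norm_num
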